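-- pv_equiv track=rewrite | github.com/bconfiden2/daily-ps | programmers/kakao/64061.py | solution
-- ===== SOURCE A (Python) =====
-- def solution(board, moves):
--     answer = 0
--     N = len(board)
--     # 각 레일별로, 뽑힐 경우 몇번째 행을 봐야하는지
--     indices = [sum(1 if board[r][c]==0 else 0 for r in range(N)) for c in range(N)]
--
--     basket = [0]
--     for rail in moves:
--         # 레일 인덱스 0 ~ N-1 로 맞추기
--         rail -= 1
--         # 해당 레일에 인형이 남아 있을 때만
--         if indices[rail] < N:
--             # 인형을 뽑아서 바구니에 넣어줌
--             basket.append(board[indices[rail]][rail])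
--             indices[rail] += 1
--             # 만약 바구니의 2개가 같은 인형이라면 터트림
--             if basket[-1] == basket[-2]:
--                 answer += 2
--                 basket.pop()
--                 basket.pop()
--
--     return answer
-- ===== SOURCE B (Python) =====
-- def solution(board, moves):
--     # Different decomposition: per-column stacks of remaining dolls instead of
--     # an integer pointer array into the shared board matrix.
--     n = len(board)
--     columns = [[board[r][c] for r in range(n) if board[r][c] != 0] for c in range(n)]
--     answer = 0
--     basket = []
--     for m in moves:
--         col = columns[m - 1]
--         if col:
--             doll = col.pop(0)
--             if basket and basket[-1] == doll:
--                 basket.pop()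
--                 answer += 2
--             else:
--                 basket.append(doll)
--     return answer
-- ===== Notes on version B (the rewrite author's own statement) =====
-- stated objective: alternative
-- what changed: B pre-builds per-column stacks of the nonzero dolls and pops from them, with an empty-basket-aware match check, instead of A's zero-count pointer array indexing into the shared board and a 0-sentinel basket.
-- outside the precondition, e.g. on solution([[1, 0], [0, 0]], [1, 1]): A returns 2, B returns 0; on solution([[1, 5, 7], [2, 6, 7]], [0, 0]): A returns 2, B returns 0
import Mathlib
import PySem

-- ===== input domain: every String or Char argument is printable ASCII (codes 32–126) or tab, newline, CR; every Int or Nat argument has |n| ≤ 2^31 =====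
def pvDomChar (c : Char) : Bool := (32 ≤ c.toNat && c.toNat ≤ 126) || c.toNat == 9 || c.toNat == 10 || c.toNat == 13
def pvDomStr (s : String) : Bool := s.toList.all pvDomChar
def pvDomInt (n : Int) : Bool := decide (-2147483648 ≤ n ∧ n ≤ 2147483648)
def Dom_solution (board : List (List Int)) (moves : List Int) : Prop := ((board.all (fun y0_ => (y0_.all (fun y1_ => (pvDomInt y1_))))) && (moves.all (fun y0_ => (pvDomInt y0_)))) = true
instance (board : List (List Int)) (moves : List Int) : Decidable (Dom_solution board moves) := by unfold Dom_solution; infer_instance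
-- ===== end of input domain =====

-- B keeps per-column stacks of the remaining nonzero dolls and pops them, instead of
-- A's zero-count pointer array into the shared board; return-value equivalence on Pre_.

-- board[r][c] for 0 ≤ r,c (exact inside Pre_, where rows have length N and r,c < N)
def cell (board : List (List Int)) (r c : Nat) : Int := (board.getD r []).getD c 0

-- Python negative-index normalization for an index i into a length-N list
def pyNorm (i : Int) (N : Nat) : Nat := (if i < 0 then i + N else i).toNat

-- ===== PORT A =====
-- indices[c] = sum(1 if board[r][c]==0 else 0 for r in range(N))
def colCount (board : List (List Int)) (N c : Nat) : Int :=
  ((List.range N).map (fun r => if cell board r c = 0 then (1:Int) else 0)).sum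

-- one iteration of A's move loop; basket is kept reversed (head = Python basket[-1])
def stepA (board : List (List Int)) (N : Nat)
    (st : List Int × List Int × Int) (m : Int) : List Int × List Int × Int :=
  let (indices, basket, answer) := st
  let j := pyNorm (m - 1) N
  let idx := indices.getD j 0
  if idx < (N : Int) then
    let basket' := cell board idx.toNat j :: basket
    let indices' := indices.set j (idx + 1)
    match basket' with
    | a :: b :: rest => if a = b then (indices', rest, answer + 2) else (indices', basket', answer)
    | _ => (indices', basket', answer)
  else st

def solution (board : List (List Int)) (moves : List Int) : Int :=
  let N := board.length
  let indices := (List.range N).map (fun c => colCount board N c)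
  (moves.foldl (stepA board N) (indices, [0], 0)).2.2

-- ===== PORT B =====
-- one iteration of B's move loop; basket reversed (head = Python basket[-1])
def stepB (st : List (List Int) × List Int × Int) (m : Int) : List (List Int) × List Int × Int :=
  let (columns, basket, answer) := st
  let j := pyNorm (m - 1) columns.length
  match columns.getD j [] with
  | [] => (columns, basket, answer)
  | doll :: rest =>
    let columns' := columns.set j rest
    match basket with
    | t :: bs => if t = doll then (columns', bs, answer + 2)
                 else (columns', doll :: t :: bs, answer)
    | [] => (columns', [doll], answer)

def solution_alt (board : List (List Int)) (moves : List Int) : Int :=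
  let n := board.length
  let columns := (List.range n).map
    (fun c => ((List.range n).map (fun r => cell board r c)).filter (fun x => x ≠ 0))
  (moves.foldl stepB (columns, [], 0)).2.2

-- ===== PRECONDITION & SPEC =====
-- Pre_ excludes: boards with a row shorter than len(board) and moves outside [1-N, N],
-- on which A raises IndexError; non-positive moves combined with a row longer than
-- len(board), where Python's negative row indexing makes A read cells of the wrong
-- column; and boards where some column has a zero below a nonzero doll — outside the
-- puzzle's input format, where A's zero-count pointer skips dolls and pulls phantom 0s
-- while B pops the real dolls, and neither value is specified (columns no move ever
-- touches are unconstrained).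
def Pre_solution (board : List (List Int)) (moves : List Int) : Prop :=
  (∀ row ∈ board, board.length ≤ row.length) ∧
  ((∀ m ∈ moves, 1 ≤ m) ∨ (∀ row ∈ board, row.length = board.length)) ∧
  (∀ m ∈ moves, 1 - (board.length : Int) ≤ m ∧ m ≤ (board.length : Int)) ∧
  (∀ c < board.length,
      (moves.contains ((c : Int) + 1) || moves.contains ((c : Int) + 1 - board.length)) = false ∨
      (∀ r2 < board.length, ∀ r1 ≤ r2, cell board r1 c ≠ 0 → cell board r2 c ≠ 0))
instance (board : List (List Int)) (moves : List Int) : Decidable (Pre_solution board moves) := by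
  unfold Pre_solution; infer_instance

def pvWitness_solution : List (List Int) × List Int := ([[0, 3], [2, 5]], [1, 2, 1])

def Spec_solution (board : List (List Int)) (moves : List Int) (out : Int) : Prop := out = solution_alt board moves
instance (board : List (List Int)) (moves : List Int) (out : Int) : Decidable (Spec_solution board moves out) := by unfold Spec_solution; infer_instance

-- ===== CLAIM (what is proved, stated in full; the proofs are below) =====
def Claim_equal_solution : Prop := ∀ (board : List (List Int)) (moves : List Int), Dom_solution board moves → Pre_solution board moves → Spec_solution board moves (solution board moves)

-- ===== LEMMAS AND PROOFS =====

def colList (board : List (List Int)) (N c : Nat) : List Int :=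
  (List.range N).map (fun r => cell board r c)

def zcount (xs : List Int) : Nat := xs.countP (fun x => decide (x = 0))

lemma sum_indicator_eq_zcount (xs : List Int) :
    ((xs.map (fun x => if x = 0 then (1:Int) else 0)).sum = (zcount xs : Int)) := by
  induction xs with
  | nil => simp [zcount]
  | cons x xs ih =>
    by_cases h : x = 0 <;> simp [zcount, List.countP_cons, h, ih.symm] <;>
      simp [zcount] at ih <;> omega

lemma filter_eq_drop_zcount (xs : List Int)
    (h : ∀ r2 < xs.length, ∀ r1 ≤ r2, xs.getD r1 0 ≠ 0 → xs.getD r2 0 ≠ 0) :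
    xs.filter (fun x => x ≠ 0) = xs.drop (zcount xs) := by
  induction xs with
  | nil => simp [zcount]
  | cons x xs ih =>
    by_cases hx : x = 0
    · subst hx
      have : xs.filter (fun x => x ≠ 0) = xs.drop (zcount xs) := by
        apply ih
        intro r2 h2 r1 h1 hne
        exact h (r2+1) (by simpa using Nat.succ_lt_succ h2) (r1+1) (by omega) hne
      simpa [zcount, List.countP_cons] using this
    · have hall : ∀ y ∈ xs, y ≠ 0 := by
        intro y hy
        obtain ⟨i, hi, rfl⟩ := List.getElem_of_mem hy
        have := h (i+1) (by simpa using Nat.succ_lt_succ hi) 0 (by omega)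
          (by simpa using hx)
        simpa [List.getD, List.getElem?_eq_getElem hi] using this
      have h0 : xs.countP (fun x => decide (x = 0)) = 0 :=
        List.countP_eq_zero.2 (by intro y hy; simpa using hall y hy)
      have hz : zcount (x :: xs) = 0 := by
        simp [zcount, List.countP_cons, hx, h0]
      have hf : (x :: xs).filter (fun y => y ≠ 0) = x :: xs :=
        List.filter_eq_self.2 (by
          intro y hy
          rcases List.mem_cons.1 hy with rfl | hy
          · simpa using hx
          · simpa using hall y hy)
      rw [hz, hf, List.drop_zero]

lemma colList_length (board : List (List Int)) (N c : Nat) :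
    (colList board N c).length = N := by simp [colList]

lemma colList_getElem (board : List (List Int)) (N c r : Nat) (h : r < N) :
    (colList board N c)[r]'(by simp [colList_length]; omega) = cell board r c := by
  simp [colList]

-- column c is pulled from by some move of moves0 (Python index c or its wraparound)
def Touch (moves0 : List Int) (N c : Nat) : Prop :=
  (c : Int) + 1 ∈ moves0 ∨ (c : Int) + 1 - (N : Int) ∈ moves0

-- the joint loop invariant: A's pointer state vs B's column stacks (only the
-- columns some move touches need to satisfy it)
lemma loop_eq (board : List (List Int)) (N : Nat) (moves0 : List Int) :
    ∀ (moves : List Int) (indices : List Int) (columns : List (List Int))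
      (bB : List Int) (ans : Int),
      (∀ m ∈ moves, m ∈ moves0) →
      (∀ m ∈ moves, 1 - (N : Int) ≤ m ∧ m ≤ (N : Int)) →
      indices.length = N → columns.length = N →
      (∀ c < N, Touch moves0 N c → ∃ k : Nat, indices.getD c 0 = (k : Int) ∧ k ≤ N ∧
          columns.getD c [] = (colList board N c).drop k ∧
          ∀ x ∈ (colList board N c).drop k, x ≠ 0) →
      (moves.foldl (stepA board N) (indices, bB ++ [0], ans)).2.2
        = (moves.foldl stepB (columns, bB, ans)).2.2 := by
  intro moves
  induction moves with
  | nil => intro _ _ _ _ _ _ _ _ _; simp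
  | cons m ms ih =>
    intro indices columns bB ans hsub hm hli hlc hcol
    have hmb := hm m (List.mem_cons_self ..)
    have hN : 0 < N := by
      rcases Nat.eq_zero_or_pos N with h0 | h; · omega
      · exact h
    set j := pyNorm (m - 1) N with hj
    have hjN : j < N := by
      simp only [hj, pyNorm]
      split <;> omega
    have hjm : ((j : Int) + 1 = m) ∨ ((j : Int) + 1 - (N : Int) = m) := by
      simp only [hj, pyNorm]
      split <;> [right; left] <;> omega
    have hTj : Touch moves0 N j := by
      rcases hjm with h | h
      · exact Or.inl (h ▸ hsub m (List.mem_cons_self ..))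
      · exact Or.inr (h ▸ hsub m (List.mem_cons_self ..))
    obtain ⟨k, hik, hkN, hck, hnz⟩ := hcol j hjN hTj
    have hmss : ∀ m' ∈ ms, m' ∈ moves0 := fun m' h' => hsub m' (List.mem_cons_of_mem _ h')
    have hms : ∀ m' ∈ ms, 1 - (N : Int) ≤ m' ∧ m' ≤ (N : Int) :=
      fun m' h' => hm m' (List.mem_cons_of_mem _ h')
    simp only [List.foldl_cons]
    by_cases hk : k < N
    · -- a doll is pulled on both sides
      have hdrop : (colList board N j).drop k
          = cell board k j :: (colList board N j).drop (k+1) := by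
        rw [List.drop_eq_getElem_cons (by simp [colList_length]; omega)]
        rw [colList_getElem board N j k hk]
      have hdollnz : cell board k j ≠ 0 := by
        apply hnz; rw [hdrop]; exact List.mem_cons_self ..
      have hA : stepA board N (indices, bB ++ [0], ans) m
          = (indices.set j ((k:Int) + 1),
             (match cell board k j :: bB ++ [0] with
              | a :: b :: rest => if a = b then rest else cell board k j :: bB ++ [0]
              | _ => cell board k j :: bB ++ [0]),
             (match cell board k j :: bB ++ [0] with
              | a :: b :: rest => if a = b then ans + 2 else ans
              | _ => ans)) := by
        simp only [stepA, ← hj, hik]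
        rw [if_pos (by exact_mod_cast hk)]
        simp only [Int.toNat_natCast]
        rcases bB with _ | ⟨t, bs⟩ <;> simp <;> split_ifs <;> rfl
      have hB : stepB (columns, bB, ans) m
          = (columns.set j ((colList board N j).drop (k+1)),
             (match bB with
              | t :: bs => if t = cell board k j then bs else cell board k j :: t :: bs
              | [] => [cell board k j]),
             (match bB with
              | t :: bs => if t = cell board k j then ans + 2 else ans
              | [] => ans)) := by
        simp only [stepB, hlc, ← hj, hck, hdrop]
        rcases bB with _ | ⟨t, bs⟩ <;> simp <;> split_ifs <;> rfl
      have hinv : ∀ c < N, Touch moves0 N c → ∃ k' : Nat,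
          (indices.set j ((k:Int) + 1)).getD c 0 = (k' : Int) ∧ k' ≤ N ∧
          (columns.set j ((colList board N j).drop (k+1))).getD c [] = (colList board N c).drop k' ∧
          ∀ x ∈ (colList board N c).drop k', x ≠ 0 := by
        intro c hc hTc
        by_cases hcj : c = j
        · subst hcj
          refine ⟨k + 1, ?_, by omega, ?_, ?_⟩
          · rw [List.getD, List.getElem?_set_self (by omega)]; push_cast; rfl
          · rw [List.getD, List.getElem?_set_self (by omega)]; rfl
          · intro x hx; exact hnz x (by rw [hdrop]; exact List.mem_cons_of_mem _ hx)
        · obtain ⟨k', h1, h2, h3, h4⟩ := hcol c hc hTc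
          refine ⟨k', ?_, h2, ?_, h4⟩
          · rw [List.getD, List.getElem?_set_ne (by omega)]; exact h1
          · rw [List.getD, List.getElem?_set_ne (by omega)]; exact h3
      rcases bB with _ | ⟨t, bs⟩
      · -- empty B basket: A compares the doll with the 0 sentinel, never equal
        rw [hA, hB]
        simp only [List.cons_append, List.nil_append]
        simp only [if_neg hdollnz]
        exact ih _ _ [cell board k j] ans hmss hms (by simp [hli]) (by simp [hlc]) hinv
      · rw [hA, hB]
        simp only [List.cons_append]
        by_cases ht : cell board k j = t
        · simp only [if_pos ht, if_pos ht.symm]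
          exact ih _ _ _ _ hmss hms (by simp [hli]) (by simp [hlc]) hinv
        · simp only [if_neg ht, if_neg (show ¬ t = cell board k j from fun h => ht h.symm)]
          exact ih _ _ (cell board k j :: t :: bs) ans hmss hms (by simp [hli]) (by simp [hlc]) hinv
    · -- column exhausted on both sides: no change
      have hkeq : k = N := by omega
      have hA : stepA board N (indices, bB ++ [0], ans) m = (indices, bB ++ [0], ans) := by
        simp only [stepA, ← hj, hik]
        rw [if_neg (by omega : ¬ ((k:Int) < (N:Int)))]
      have hB : stepB (columns, bB, ans) m = (columns, bB, ans) := by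
        have : columns.getD j [] = [] := by
          rw [hck, hkeq, List.drop_eq_nil_of_le (by simp [colList_length])]
        simp only [stepB, hlc, ← hj, this]
      rw [hA, hB]
      exact ih _ _ _ _ hmss hms hli hlc hcol

-- ===== VERDICT (by name: the statement is the Claim_ definition above) =====
theorem solution_spec : Claim_equal_solution := by
  intro board moves _ hpre
  obtain ⟨hrows, hsq, hmoves, hzp⟩ := hpre
  show solution board moves = solution_alt board moves
  unfold solution solution_alt
  apply loop_eq board board.length moves moves _ _ [] 0 (fun _ h => h) hmoves (by simp) (by simp)
  intro c hc hTc
  have hz := (hzp c hc).resolve_left (by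
    rcases hTc with h | h <;> simp [List.contains_eq_mem, h])
  refine ⟨zcount (colList board board.length c), ?_, ?_, ?_, ?_⟩
  · rw [List.getD, List.getElem?_map, List.getElem?_range hc]
    simp only [Option.map_some, Option.getD_some, colCount]
    rw [show (List.range board.length).map (fun r => if cell board r c = 0 then (1:Int) else 0)
        = (colList board board.length c).map (fun x => if x = 0 then (1:Int) else 0) by
      simp [colList, List.map_map]]
    exact sum_indicator_eq_zcount _
  · simpa [colList_length] using List.countP_le_length (l := colList board board.length c) ..
  · rw [List.getD, List.getElem?_map, List.getElem?_range hc]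
    simp only [Option.map_some, Option.getD_some]
    rw [← filter_eq_drop_zcount]
    · rfl
    · intro r2 h2 r1 h1 hne
      rw [colList_length] at h2
      have g1 : (colList board board.length c).getD r1 0 = cell board r1 c := by
        rw [List.getD, List.getElem?_eq_getElem (by rw [colList_length]; omega)]
        simp [colList_getElem board board.length c r1 (by omega)]
      have g2 : (colList board board.length c).getD r2 0 = cell board r2 c := by
        rw [List.getD, List.getElem?_eq_getElem (by rw [colList_length]; omega)]
        simp [colList_getElem board board.length c r2 h2]
      rw [g1] at hne; rw [g2]
      exact hz r2 h2 r1 h1 hne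
  · intro x hx
    rw [← filter_eq_drop_zcount] at hx
    · simpa using (List.of_mem_filter hx)
    · intro r2 h2 r1 h1 hne
      rw [colList_length] at h2
      have g1 : (colList board board.length c).getD r1 0 = cell board r1 c := by
        rw [List.getD, List.getElem?_eq_getElem (by rw [colList_length]; omega)]
        simp [colList_getElem board board.length c r1 (by omega)]
      have g2 : (colList board board.length c).getD r2 0 = cell board r2 c := by
        rw [List.getD, List.getElem?_eq_getElem (by rw [colList_length]; omega)]
        simp [colList_getElem board board.length c r2 h2]
      rw [g1] at hne; rw [g2]
      exact hz r2 h2 r1 h1 hne
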